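-- pv_equiv track=rewrite | github.com/MarcoCarry97/UniUpo-Projects | Bachelor/First year/First Semester/Programming 1/Practise/dizionari.py | fieraest
-- ===== SOURCE A (Python) =====
-- def fieraest(lista):
--     fiera=[]
--     stringa=lista[0]
--     for i in range(1,len(lista)):
--         for j in range(i-1,i):
--             stringa=lista[i]+">"+stringa
--         fiera+=[stringa]
--     return fiera
-- ===== SOURCE B (Python) =====
-- def fieraest(lista):
--     full = ">".join(reversed(lista))
--     m = len(full)
--     length = len(lista[0])
--     out = []
--     for s in lista[1:]:
--         length += 1 + len(s)
--         out.append(full[m - length:])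
--     return out
-- ===== Notes on version B (the rewrite author's own statement) =====
-- stated objective: alternative
-- what changed: B joins the whole reversed list once and cuts every answer out of that single string as a suffix via running offset arithmetic, instead of threading a growing accumulator string through a loop of repeated concatenations.
import Mathlib
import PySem

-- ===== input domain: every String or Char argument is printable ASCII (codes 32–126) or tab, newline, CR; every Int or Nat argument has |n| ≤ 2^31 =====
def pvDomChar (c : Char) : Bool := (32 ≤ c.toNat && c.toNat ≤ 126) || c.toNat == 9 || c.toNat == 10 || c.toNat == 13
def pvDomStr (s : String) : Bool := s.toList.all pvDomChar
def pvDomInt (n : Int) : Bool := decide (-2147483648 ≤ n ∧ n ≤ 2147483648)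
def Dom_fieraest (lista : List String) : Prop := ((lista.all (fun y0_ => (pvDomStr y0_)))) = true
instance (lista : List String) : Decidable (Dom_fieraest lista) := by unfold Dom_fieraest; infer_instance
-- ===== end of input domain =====

-- B joins the whole reversed list once and cuts every answer out of it as a suffix by
-- offset arithmetic, instead of threading a running accumulator string through a loop.

-- ===== PORT A =====
-- one iteration of A's outer for-loop (the inner 'for j in range(i-1,i)' is kept literally)
def fieraestStep (lista : List String) (st : List String × String) (i : Int) :
    List String × String :=
  let stringa := (PySem.List.pyRange (i - 1) i).foldl
    (fun s _j => (PySem.List.pyGet? lista i).getD "" ++ ">" ++ s) st.2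
  (st.1 ++ [stringa], stringa)

def fieraest (lista : List String) : List String :=
  let stringa := (PySem.List.pyGet? lista 0).getD ""   -- lista[0]; Pre_ excludes the IndexError case
  ((PySem.List.pyRange 1 (lista.length : Int)).foldl (fieraestStep lista) ([], stringa)).1

-- ===== PORT B =====
-- one iteration of B's for-loop: extend the running offset, cut the suffix of 'full'
def fieraestStepB (full : String) (m : Int) (st : Int × List String) (s : String) :
    Int × List String :=
  let length := st.1 + 1 + PySem.Str.len s
  (length, st.2 ++ [PySem.Str.slice full (some (m - length)) none])

def fieraest_alt (lista : List String) : List String :=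
  let full := PySem.Str.join ">" lista.reverse
  let m := PySem.Str.len full
  ((PySem.List.slice lista (some 1) none).foldl (fieraestStepB full m)
    (PySem.Str.len ((PySem.List.pyGet? lista 0).getD ""), [])).2   -- len(lista[0]); Pre_ excludes []

-- ===== PRECONDITION & SPEC =====
-- Both A and B evaluate lista[0] unconditionally, so both raise IndexError on the empty
-- list; Pre_ excludes exactly that input and nothing else.
def Pre_fieraest (lista : List String) : Prop := lista ≠ []
instance (lista : List String) : Decidable (Pre_fieraest lista) := by unfold Pre_fieraest; infer_instance
def pvWitness_fieraest : List String := (["a", "b", "c"])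

def Spec_fieraest (lista : List String) (out : List String) : Prop := out = fieraest_alt lista
instance (lista : List String) (out : List String) : Decidable (Spec_fieraest lista out) := by unfold Spec_fieraest; infer_instance

-- ===== CLAIM (what is proved, stated in full; the proofs are below) =====
def Claim_equal_fieraest : Prop := ∀ (lista : List String), Dom_fieraest lista → Pre_fieraest lista → Spec_fieraest lista (fieraest lista)

-- ===== LEMMAS AND PROOFS =====

-- the common value both programs produce at index k: the ">"-join of the reversed (k+1)-prefix
def fieraestPiece (lista : List String) (i : Int) : String :=
  PySem.Str.join ">" ((PySem.List.slice lista none (some (i + 1))).reverse)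

theorem join_gt_cons_cons (a b : String) (rest : List String) :
    PySem.Str.join ">" (a :: b :: rest) = a ++ ">" ++ PySem.Str.join ">" (b :: rest) := by
  apply String.toList_injective
  simp [PySem.Str.toList_join, PySem.Chars.join_cons_cons]

theorem join_gt_singleton (a : String) : PySem.Str.join ">" [a] = a := by
  apply String.toList_injective
  simp [PySem.Str.toList_join, PySem.Chars.join_singleton]

theorem join_gt_split (xs ys : List String) (hx : xs ≠ []) (hy : ys ≠ []) :
    PySem.Str.join ">" (xs ++ ys) = PySem.Str.join ">" xs ++ ">" ++ PySem.Str.join ">" ys := by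
  obtain ⟨c, ys', rfl⟩ := List.exists_cons_of_ne_nil hy
  induction xs with
  | nil => exact absurd rfl hx
  | cons a xs' ih =>
    cases xs' with
    | nil => simp only [List.singleton_append, join_gt_cons_cons, join_gt_singleton]
    | cons b rest =>
      have h := ih (by simp)
      simp only [List.cons_append] at h ⊢
      rw [join_gt_cons_cons, h, join_gt_cons_cons]
      apply String.toList_injective
      simp

theorem piece_eq (lista : List String) (k : Nat) :
    fieraestPiece lista (k : Int) = PySem.Str.join ">" ((lista.take (k + 1)).reverse) := by
  have h : ((k : Int) + 1) = ((k + 1 : Nat) : Int) := by push_cast; ring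
  unfold fieraestPiece
  rw [h, PySem.List.slice_to_natCast]

-- the (k+1)-prefix join extends the k-prefix join on the left
theorem join_prefix_succ (lista : List String) (k : Nat) (h1 : 1 ≤ k) (hk : k < lista.length) :
    PySem.Str.join ">" ((lista.take (k + 1)).reverse)
      = lista[k] ++ ">" ++ PySem.Str.join ">" ((lista.take k).reverse) := by
  have htake : lista.take (k + 1) = lista.take k ++ [lista[k]] := by
    rw [List.take_add_one]; simp [List.getElem?_eq_getElem hk]
  have hnil : (lista.take k).reverse ≠ [] := by
    intro h
    have := congrArg List.length h
    simp only [List.length_reverse, List.length_take, List.length_nil] at this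
    omega
  obtain ⟨hd, tl, hcons⟩ := List.exists_cons_of_ne_nil hnil
  rw [htake, List.reverse_append, List.reverse_singleton, List.singleton_append,
    hcons, join_gt_cons_cons]

theorem len_join_prefix_succ (lista : List String) (k : Nat) (h1 : 1 ≤ k) (hk : k < lista.length) :
    PySem.Str.len (PySem.Str.join ">" ((lista.take (k + 1)).reverse))
      = PySem.Str.len (PySem.Str.join ">" ((lista.take k).reverse)) + 1
        + PySem.Str.len lista[k] := by
  rw [join_prefix_succ lista k h1 hk]
  simp only [PySem.Str.len_eq, String.toList_append]
  simp
  omega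

-- every answer is a suffix of the one full join, cut at the right offset
theorem piece_suffix (lista : List String) (j : Nat) (h1 : 1 ≤ j) (hj : j ≤ lista.length) :
    PySem.Str.slice (PySem.Str.join ">" lista.reverse)
        (some (PySem.Str.len (PySem.Str.join ">" lista.reverse)
          - PySem.Str.len (PySem.Str.join ">" ((lista.take j).reverse)))) none
      = PySem.Str.join ">" ((lista.take j).reverse) := by
  by_cases hlt : j < lista.length
  · -- proper prefix: full = join(drop-part) ++ ">" ++ join(take-part)
    have hsplit : lista.reverse = (lista.drop j).reverse ++ (lista.take j).reverse := by
      rw [← List.reverse_append, List.take_append_drop]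
    have hd : (lista.drop j).reverse ≠ [] := by
      intro h
      have := congrArg List.length h
      simp only [List.length_reverse, List.length_drop, List.length_nil] at this
      omega
    have ht : (lista.take j).reverse ≠ [] := by
      intro h
      have := congrArg List.length h
      simp only [List.length_reverse, List.length_take, List.length_nil] at this
      omega
    rw [hsplit, join_gt_split _ _ hd ht]
    apply String.toList_injective
    rw [PySem.Str.toList_slice]
    have hlen : PySem.Str.len (PySem.Str.join ">" (lista.drop j).reverse ++ ">"
          ++ PySem.Str.join ">" ((lista.take j).reverse))
        - PySem.Str.len (PySem.Str.join ">" ((lista.take j).reverse))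
        = ((PySem.Str.join ">" (lista.drop j).reverse).toList.length + 1 : Nat) := by
      simp only [PySem.Str.len_eq, String.toList_append]
      simp
      omega
    rw [hlen]
    simp only [PySem.Chars.slice]
    rw [PySem.List.slice_from _ (by positivity)]
    simp only [Int.toNat_natCast, String.toList_append]
    have : (PySem.Str.join ">" (lista.drop j).reverse).toList ++ ">".toList
          ++ (PySem.Str.join ">" ((lista.take j).reverse)).toList
        = ((PySem.Str.join ">" (lista.drop j).reverse).toList ++ ">".toList)
          ++ (PySem.Str.join ">" ((lista.take j).reverse)).toList := by
      simp
    rw [this]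
    have hl : (PySem.Str.join ">" (lista.drop j).reverse).toList.length + 1
        = ((PySem.Str.join ">" (lista.drop j).reverse).toList ++ ">".toList).length := by
      simp [show (">".toList : List Char) = ['>'] from rfl]
    rw [hl, List.drop_left]
  · -- j = length: the whole string, offset 0
    have hje : j = lista.length := by omega
    have : lista.take j = lista := by rw [hje, List.take_length]
    rw [this, sub_self]
    apply String.toList_injective
    rw [PySem.Str.toList_slice]
    simp only [PySem.Chars.slice]
    rw [PySem.List.slice_from _ (by omega)]
    simp

-- loop invariant for A: after indices 1..k-1 the accumulator holds the pieces and the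
-- running string is the join of the reversed k-prefix
theorem fieraest_inv (lista : List String) (hne : lista ≠ []) :
    ∀ k : Nat, 1 ≤ k → k ≤ lista.length →
      (PySem.List.pyRange 1 (k : Int)).foldl (fieraestStep lista)
          ([], (PySem.List.pyGet? lista 0).getD "")
        = ((PySem.List.pyRange 1 (k : Int)).map (fieraestPiece lista),
           PySem.Str.join ">" ((lista.take k).reverse)) := by
  intro k
  induction k with
  | zero => intro h; omega
  | succ k ih =>
    intro _ hle
    by_cases hk : 1 ≤ k
    · have hrange : PySem.List.pyRange 1 ((k + 1 : Nat) : Int)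
          = PySem.List.pyRange 1 (k : Int) ++ [(k : Int)] := by
        have := PySem.List.pyRange_one_succ_right (a := 1) (b := (k : Int)) (by exact_mod_cast hk)
        push_cast
        exact this
      have hklen : k < lista.length := by omega
      rw [hrange, List.foldl_append, ih hk (by omega), List.map_append]
      have hinner : PySem.List.pyRange ((k : Int) - 1) (k : Int) = [(k : Int) - 1] := by
        rw [PySem.List.pyRange_one_cons (by omega)]
        simp [PySem.List.pyRange]
      have hget : (PySem.List.pyGet? lista (k : Int)).getD "" = lista[k] := by
        rw [PySem.List.pyGet?_ofNat lista k hklen]; rfl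
      simp only [fieraestStep, hinner, List.foldl_cons, List.foldl_nil, hget]
      simp [piece_eq lista k, join_prefix_succ lista k hk hklen]
    · have hk0 : k = 0 := by omega
      subst hk0
      have h0 : lista.take 1 = [(PySem.List.pyGet? lista 0).getD ""] := by
        obtain ⟨x, xs, rfl⟩ := List.exists_cons_of_ne_nil hne
        simp
      simp [PySem.List.pyRange, h0, join_gt_singleton]

-- loop invariant for B: after the first t tail elements the offset is the length of the
-- (t+1)-prefix join and the output holds the same pieces as A's
theorem fieraest_alt_inv (lista : List String) (hne : lista ≠ []) :
    ∀ t : Nat, t ≤ lista.length - 1 →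
      (lista.tail.take t).foldl
          (fieraestStepB (PySem.Str.join ">" lista.reverse)
            (PySem.Str.len (PySem.Str.join ">" lista.reverse)))
          (PySem.Str.len ((PySem.List.pyGet? lista 0).getD ""), [])
        = (PySem.Str.len (PySem.Str.join ">" ((lista.take (t + 1)).reverse)),
           (PySem.List.pyRange 1 ((t + 1 : Nat) : Int)).map (fieraestPiece lista)) := by
  intro t
  induction t with
  | zero =>
    intro _
    have h0 : lista.take 1 = [(PySem.List.pyGet? lista 0).getD ""] := by
      obtain ⟨x, xs, rfl⟩ := List.exists_cons_of_ne_nil hne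
      simp
    simp [PySem.List.pyRange, h0, join_gt_singleton]
  | succ t ih =>
    intro hle
    have hlen1 : 1 ≤ lista.length := by
      cases lista with
      | nil => exact absurd rfl hne
      | cons x xs => simp
    have htlen : t < lista.tail.length := by
      simp only [List.length_tail]
      omega
    have htake : lista.tail.take (t + 1) = lista.tail.take t ++ [lista.tail[t]] := by
      rw [List.take_add_one]; simp [List.getElem?_eq_getElem htlen]
    have hgetT : lista.tail[t] = lista[t + 1]'(by simp only [List.length_tail] at htlen; omega) := by
      simp [List.getElem_tail]
    rw [htake, List.foldl_append, ih (by omega), List.foldl_cons, List.foldl_nil]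
    have h1t : 1 ≤ t + 1 := by omega
    have hklen : t + 1 < lista.length := by simp only [List.length_tail] at htlen; omega
    have hL : PySem.Str.len (PySem.Str.join ">" ((lista.take (t + 1)).reverse)) + 1
          + PySem.Str.len lista.tail[t]
        = PySem.Str.len (PySem.Str.join ">" ((lista.take (t + 1 + 1)).reverse)) := by
      rw [len_join_prefix_succ lista (t + 1) h1t hklen, hgetT]
    have hrange : PySem.List.pyRange 1 ((t + 1 + 1 : Nat) : Int)
        = PySem.List.pyRange 1 ((t + 1 : Nat) : Int) ++ [((t + 1 : Nat) : Int)] := by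
      have := PySem.List.pyRange_one_succ_right (a := 1) (b := ((t + 1 : Nat) : Int))
        (by exact_mod_cast h1t)
      push_cast at this ⊢
      exact this
    rw [hrange, List.map_append]
    simp only [fieraestStepB, hL, List.map_cons, List.map_nil]
    rw [piece_suffix lista (t + 1 + 1) (by omega) (by omega), piece_eq lista (t + 1)]

-- ===== VERDICT (by name: the statement is the Claim_ definition above) =====
theorem fieraest_spec : Claim_equal_fieraest := by
  intro lista _ hpre
  unfold Spec_fieraest
  have hlen : 1 ≤ lista.length := by
    cases lista with
    | nil => exact absurd rfl hpre
    | cons x xs => simp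
  have hA : fieraest lista
      = (PySem.List.pyRange 1 (lista.length : Int)).map (fieraestPiece lista) := by
    show (List.foldl (fieraestStep lista) ([], (PySem.List.pyGet? lista 0).getD "")
        (PySem.List.pyRange 1 (lista.length : Int))).1 = _
    rw [fieraest_inv lista hpre lista.length hlen le_rfl]
  have htail : lista.tail.take (lista.length - 1) = lista.tail := by
    apply List.take_of_length_le
    simp only [List.length_tail]
    omega
  have hsucc : lista.length - 1 + 1 = lista.length := by omega
  have hB : fieraest_alt lista
      = (PySem.List.pyRange 1 (lista.length : Int)).map (fieraestPiece lista) := by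
    show (List.foldl
        (fieraestStepB (PySem.Str.join ">" lista.reverse)
          (PySem.Str.len (PySem.Str.join ">" lista.reverse)))
        (PySem.Str.len ((PySem.List.pyGet? lista 0).getD ""), [])
        (PySem.List.slice lista (some 1) none)).2 = _
    rw [PySem.List.slice_from_one, ← htail,
      fieraest_alt_inv lista hpre (lista.length - 1) le_rfl, hsucc]
  rw [hA, hB]
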